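-- pv_equiv track=rewrite | github.com/FungluiKoo/LeetCodeSolutions | good-array.py | countSubsequence
-- ===== SOURCE A (Python) =====
-- def countSubsequence(N: int, queries: list) -> int:
--     goodArray = list()
--     x = 2
--     while x <= N:
--         remainder = N%x
--         if remainder:
--             goodArray.append(remainder)
--             N -= remainder
--         x <<= 1
--     results = list()
--     for query in queries:
--         l = query[0]
--         r = query[1]
--         m = query[2]
--         result = 1
--         for i in range(l-1,r):
--             result = ((goodArray[i]%m) * result)%m
--         results.append(result)
--     return results
-- ===== SOURCE B (Python) =====
-- def countSubsequence(N: int, queries: list) -> int: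
--     # exponent list: set bits of N below its top set bit (A's goodArray holds 2**e for each)
--     exps = [i for i in range(N.bit_length() - 1) if (N >> i) & 1] if N > 0 else []
--     results = []
--     for query in queries:
--         l, r, m = query[0], query[1], query[2]
--         if l - 1 >= r:
--             results.append(1)
--         else:
--             e = 0
--             for i in range(l - 1, r):
--                 e += exps[i]
--             results.append(pow(2, e, m))
--     return results
-- ===== Notes on version B (the rewrite author's own statement) =====
-- stated objective: alternative
-- what changed: B replaces A's remainder-subtraction while-loop by a direct bit scan of N into a list of exponents, and A's per-query modular-multiplication loop by a plain integer sum of exponents followed by a single modular exponentiation pow(2, e, m) per query.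
import Mathlib
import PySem

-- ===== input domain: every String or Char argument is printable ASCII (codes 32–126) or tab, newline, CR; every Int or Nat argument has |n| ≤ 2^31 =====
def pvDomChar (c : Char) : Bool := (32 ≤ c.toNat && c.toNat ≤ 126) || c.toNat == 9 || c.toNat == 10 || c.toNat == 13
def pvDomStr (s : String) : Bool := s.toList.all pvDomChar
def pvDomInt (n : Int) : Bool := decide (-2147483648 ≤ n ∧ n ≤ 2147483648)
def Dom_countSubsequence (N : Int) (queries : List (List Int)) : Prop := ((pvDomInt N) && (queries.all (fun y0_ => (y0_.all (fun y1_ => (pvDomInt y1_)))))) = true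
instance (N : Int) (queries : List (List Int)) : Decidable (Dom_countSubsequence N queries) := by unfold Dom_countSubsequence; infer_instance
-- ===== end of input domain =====

-- B replaces A's remainder-subtraction while loop by a direct bit scan of N, and A's per-query
-- modular-product loop by summing exponents and one modular power per query (same return values).

-- ===== PORT A =====
-- the 'while x <= N' loop; state = (goodArray, x, N); the hypothesis 2 ≤ x only justifies termination
def pvALoop (goodArray : List Int) (x N : Int) (hx : 2 ≤ x) : List Int :=
  if _h : x ≤ N then
    let remainder := PySem.Int.mod N x          -- N % x
    if remainder ≠ 0 then
      pvALoop (goodArray ++ [remainder]) (x * 2) (N - remainder) (by omega)   -- x <<= 1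
    else
      pvALoop goodArray (x * 2) N (by omega)
  else goodArray
termination_by (N + 1 - x).toNat
decreasing_by
  · have h0 : 0 ≤ PySem.Int.mod N x := PySem.Int.mod_nonneg N (by omega)
    omega
  · omega

def countSubsequence (N : Int) (queries : List (List Int)) : List Int :=
  let goodArray := pvALoop [] 2 N (by norm_num)
  queries.foldl (fun results query =>
    let l := PySem.List.pyGetD query 0 0
    let r := PySem.List.pyGetD query 1 0
    let m := PySem.List.pyGetD query 2 0
    let result := (PySem.List.pyRange (l - 1) r).foldl
      (fun result i => PySem.Int.mod (PySem.Int.mod (PySem.List.pyGetD goodArray i 0) m * result) m) 1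
    results ++ [result]) []

-- ===== PORT B =====
-- '[i for i in range(N.bit_length() - 1) if (N >> i) & 1] if N > 0 else []'
-- (bit_length → PySem.Int.bitLength; N >> i → N >>> i.toNat, i ≥ 0 on the range; & → PySem.Int.band)
def pvExps (N : Int) : List Int :=
  if 0 < N then
    (PySem.List.pyRange 0 ((PySem.Int.bitLength N : Int) - 1)).filter
      (fun i => PySem.Int.band (N >>> i.toNat) 1 != 0)
  else []

def countSubsequence_alt (N : Int) (queries : List (List Int)) : List Int :=
  let exps := pvExps N
  queries.foldl (fun results query =>
    let l := PySem.List.pyGetD query 0 0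
    let r := PySem.List.pyGetD query 1 0
    let m := PySem.List.pyGetD query 2 0
    if l - 1 ≥ r then
      results ++ [1]
    else
      let e := (PySem.List.pyRange (l - 1) r).foldl
        (fun e i => e + PySem.List.pyGetD exps i 0) 0
      results ++ [PySem.Int.powMod 2 e.toNat m])   -- pow(2, e, m), e ≥ 0
    []

-- ===== PRECONDITION & SPEC =====
-- indices of the set bits of n below its top set bit (closed form; A's goodArray holds 2^i for each)
def pvLBits (n : Nat) : List Nat := (List.range n.log2).filter n.testBit
def pvGoodLen (N : Int) : Int := ((pvLBits N.toNat).length : Int)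
-- Pre_ excludes exactly the inputs on which the Python raises: a query shorter than 3 (IndexError),
-- a nonempty range with modulus 0 (ZeroDivisionError), or a nonempty range reaching outside the good
-- array (IndexError); Python's negative-index wraparound inside [-len, len) stays admitted.
def Pre_countSubsequence (N : Int) (queries : List (List Int)) : Prop :=
  ∀ q ∈ queries, 3 ≤ q.length ∧
    (PySem.List.pyGetD q 1 0 ≤ PySem.List.pyGetD q 0 0 - 1 ∨
      (PySem.List.pyGetD q 2 0 ≠ 0 ∧ -(pvGoodLen N) ≤ PySem.List.pyGetD q 0 0 - 1 ∧
        PySem.List.pyGetD q 1 0 ≤ pvGoodLen N))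
instance (N : Int) (queries : List (List Int)) : Decidable (Pre_countSubsequence N queries) := by
  unfold Pre_countSubsequence; infer_instance
def pvWitness_countSubsequence : Int × List (List Int) := (13, [[1, 2, 5], [2, 2, 4], [3, 1, 7]])
def Spec_countSubsequence (N : Int) (queries : List (List Int)) (out : List Int) : Prop := out = countSubsequence_alt N queries
instance (N : Int) (queries : List (List Int)) (out : List Int) : Decidable (Spec_countSubsequence N queries out) := by unfold Spec_countSubsequence; infer_instance

-- ===== CLAIM (what is proved, stated in full; the proofs are below) =====
def Claim_equal_countSubsequence : Prop := ∀ (N : Int) (queries : List (List Int)), Dom_countSubsequence N queries → Pre_countSubsequence N queries → Spec_countSubsequence N queries (countSubsequence N queries)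

-- ===== LEMMAS AND PROOFS =====

-- Python's '%' is a congruence for multiplication at any fixed modulus
theorem pvFmodMulLeft (x y m : Int) : ((x.fmod m) * y).fmod m = (x * y).fmod m := by
  have h2 : x.fmod m = x - m * x.fdiv m := by
    have := Int.fmod_add_mul_fdiv x m; linarith
  have h : x.fmod m * y = x * y + m * (-(x.fdiv m * y)) := by rw [h2]; ring
  rw [h, Int.add_mul_fmod_self_left]

theorem pvFmodMulRight (x y m : Int) : (y * (x.fmod m)).fmod m = (y * x).fmod m := by
  rw [mul_comm y, mul_comm y]; exact pvFmodMulLeft x y m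

-- low bits of a multiple of 2^j are clear
theorem pvTestBitLow {m j i : Nat} (hdvd : 2 ^ j ∣ m) (hij : i < j) : m.testBit i = false := by
  obtain ⟨s, rfl⟩ := hdvd
  rw [Nat.testBit_eq_decide_div_mod_eq]
  have h : 2 ^ j * s / 2 ^ i = 2 ^ (j - i) * s := by
    rw [show (2:Nat) ^ j = 2 ^ i * 2 ^ (j - i) by rw [← pow_add]; congr 1; omega,
      mul_assoc, Nat.mul_div_cancel_left _ (by positivity)]
  rw [h]
  obtain ⟨u, hu⟩ : 2 ∣ 2 ^ (j - i) * s := Dvd.dvd.mul_right (dvd_pow_self 2 (by omega)) s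
  rw [hu]
  simp [Nat.mul_mod_right]

-- clearing the lowest set bit (at position k-1) removes exactly the head of pvLBits
theorem pvLBitsCons (m k : Nat) (hk : 1 ≤ k) (hle : 2 ^ k ≤ m) (hdvd : 2 ^ (k - 1) ∣ m)
    (hbit : m.testBit (k - 1) = true) :
    pvLBits m = (k - 1) :: pvLBits (m - 2 ^ (k - 1)) := by
  have hpow1 : 0 < 2 ^ (k - 1) := by positivity
  have hppow : 2 ^ (k - 1) < 2 ^ k := Nat.pow_lt_pow_right (by norm_num) (by omega)
  have hm0 : m ≠ 0 := by omega
  set L := m.log2 with hL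
  set m' := m - 2 ^ (k - 1) with hm'
  have hkL : k ≤ L := (Nat.le_log2 hm0).mpr hle
  have h2Lm : 2 ^ L ≤ m := (Nat.le_log2 hm0).mp le_rfl
  have hmub : m < 2 ^ (L + 1) := (Nat.log2_lt hm0).mp (Nat.lt_succ_self L)
  have hne2 : m ≠ 2 ^ L := by
    intro h
    rw [h, Nat.testBit_two_pow] at hbit
    simp at hbit
    omega
  have hm'lb : 2 ^ L ≤ m' := by
    by_contra h
    push_neg at h
    have hd1 : 2 ^ (k - 1) ∣ 2 ^ L := pow_dvd_pow 2 (by omega)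
    have hd2 : 2 ^ (k - 1) ∣ m - 2 ^ L := Nat.dvd_sub hdvd hd1
    have hlt : m - 2 ^ L < 2 ^ (k - 1) := by omega
    have := Nat.eq_zero_of_dvd_of_lt hd2 hlt
    omega
  have hm'0 : m' ≠ 0 := by omega
  have hlog' : m'.log2 = L := by
    have ha : L ≤ m'.log2 := (Nat.le_log2 hm'0).mpr hm'lb
    have hb : m'.log2 < L + 1 := (Nat.log2_lt hm'0).mpr (by omega)
    omega
  have hdvd' : 2 ^ k ∣ m' := by
    obtain ⟨t, ht⟩ := hdvd
    have htodd : t % 2 = 1 := by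
      rw [Nat.testBit_eq_decide_div_mod_eq] at hbit
      have : m / 2 ^ (k - 1) = t := by rw [ht, Nat.mul_div_cancel_left _ hpow1]
      rw [this] at hbit
      simpa using hbit
    obtain ⟨u, hu⟩ : 2 ∣ t - 1 := by omega
    refine ⟨u, ?_⟩
    have hmt : m' = 2 ^ (k - 1) * (t - 1) := by
      rw [hm', ht, Nat.mul_sub, Nat.mul_one]
    rw [hmt, hu, show 2 ^ k = 2 ^ (k-1) * 2 by rw [← pow_succ]; congr 1; omega]
    ring
  have hdvdm' : 2 ^ (k - 1) ∣ m' := dvd_trans (pow_dvd_pow 2 (by omega)) hdvd'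
  have hbit' : m'.testBit (k - 1) = false := pvTestBitLow hdvd' (by omega)
  have hhigh : ∀ i, k ≤ i → m.testBit i = m'.testBit i := by
    intro i hi
    have hpi : 0 < (2:Nat) ^ i := by positivity
    have hklt : 2 ^ (k-1) < 2 ^ i := Nat.pow_lt_pow_right (by norm_num) (by omega)
    have hdiv : m / 2 ^ i = m' / 2 ^ i := by
      have hmm : m = m' + 2 ^ (k - 1) := by omega
      have hmod : 2 ^ k ∣ m' % 2 ^ i := (Nat.dvd_mod_iff (pow_dvd_pow 2 hi)).mpr hdvd'
      have hml : m' % 2 ^ i < 2 ^ i := Nat.mod_lt _ hpi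
      have hcond : m' % 2 ^ i + 2 ^ (k - 1) < 2 ^ i := by
        rcases Nat.eq_zero_or_pos (m' % 2 ^ i) with h0 | hpos
        · omega
        · obtain ⟨v, hv⟩ := hmod
          have h2i : (2:Nat) ^ i = 2 ^ k * 2 ^ (i - k) := by rw [← pow_add]; congr 1; omega
          have hvlt : v < 2 ^ (i - k) := by
            by_contra hq
            push_neg at hq
            have : 2 ^ k * 2 ^ (i - k) ≤ 2 ^ k * v := Nat.mul_le_mul_left _ hq
            omega
          have : 2 ^ k * v + 2 ^ k ≤ 2 ^ k * 2 ^ (i - k) := by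
            calc 2 ^ k * v + 2 ^ k = 2 ^ k * (v + 1) := by ring
              _ ≤ 2 ^ k * 2 ^ (i - k) := Nat.mul_le_mul_left _ (by omega)
          omega
      rw [hmm, Nat.add_div hpi, Nat.div_eq_of_lt hklt, Nat.mod_eq_of_lt hklt, if_neg (by omega)]
      omega
    rw [Nat.testBit_eq_decide_div_mod_eq, Nat.testBit_eq_decide_div_mod_eq, hdiv]
  have hsplit : List.range L = List.range' 0 (k-1) ++ List.range' (k-1) (L-(k-1)) := by
    rw [List.range_eq_range']
    rw [show List.range' (k-1) (L-(k-1)) = List.range' (0 + 1*(k-1)) (L-(k-1)) by congr 1; omega]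
    rw [List.range'_append]
    congr 1
    omega
  have hstep : List.range' (k-1) (L-(k-1)) = (k-1) :: List.range' k (L-k) := by
    rw [show L-(k-1) = (L-k)+1 by omega, List.range'_succ, show (k-1)+1 = k by omega]
  have hnil1 : (List.range' 0 (k-1)).filter m.testBit = [] := by
    rw [List.filter_eq_nil_iff]
    intro a ha
    rw [List.mem_range'_1] at ha
    simp [pvTestBitLow hdvd (show a < k - 1 by omega)]
  have hnil2 : (List.range' 0 (k-1)).filter m'.testBit = [] := by
    rw [List.filter_eq_nil_iff]
    intro a ha
    rw [List.mem_range'_1] at ha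
    simp [pvTestBitLow hdvdm' (show a < k - 1 by omega)]
  have hcongr : (List.range' k (L-k)).filter m.testBit = (List.range' k (L-k)).filter m'.testBit := by
    apply List.filter_congr
    intro a ha
    rw [List.mem_range'_1] at ha
    rw [hhigh a (by omega)]
  rw [pvLBits, pvLBits, hlog', ← hL, hsplit, List.filter_append, List.filter_append,
    hnil1, hnil2, hstep]
  simp only [List.nil_append, List.filter_cons, hbit, hbit', hcongr]
  simp

-- remainder of n by 2^k when the k-1 low bits are clear: the (k-1)-th bit's value
theorem pvRemNat (n k : Nat) (hk : 1 ≤ k) (hdvd : 2 ^ (k - 1) ∣ n) :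
    n % 2 ^ k = if n.testBit (k - 1) then 2 ^ (k - 1) else 0 := by
  obtain ⟨t, rfl⟩ := hdvd
  have hpow1 : 0 < (2:Nat) ^ (k - 1) := by positivity
  have h2k : (2:Nat) ^ k = 2 ^ (k - 1) * 2 := by rw [← pow_succ]; congr 1; omega
  have hmod : 2 ^ (k - 1) * t % 2 ^ k = 2 ^ (k - 1) * (t % 2) := by
    rw [h2k, Nat.mul_mod_mul_left]
  have hbit : (2 ^ (k - 1) * t).testBit (k - 1) = decide (t % 2 = 1) := by
    rw [Nat.testBit_eq_decide_div_mod_eq, Nat.mul_div_cancel_left _ hpow1]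
  rw [hmod, hbit]
  have ht2 : t % 2 = 0 ∨ t % 2 = 1 := by omega
  rcases ht2 with h | h <;> simp [h]

theorem pvSubDvd (n k : Nat) (hk : 1 ≤ k) (hdvd : 2 ^ (k - 1) ∣ n) (hb : n.testBit (k - 1) = true) :
    2 ^ k ∣ (n - 2 ^ (k - 1)) := by
  obtain ⟨t, rfl⟩ := hdvd
  have hpow1 : 0 < (2:Nat) ^ (k - 1) := by positivity
  have hbit : (2 ^ (k - 1) * t).testBit (k - 1) = decide (t % 2 = 1) := by
    rw [Nat.testBit_eq_decide_div_mod_eq, Nat.mul_div_cancel_left _ hpow1]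
  rw [hbit] at hb
  have ht : t % 2 = 1 := by simpa using hb
  obtain ⟨u, hu⟩ : 2 ∣ t - 1 := by omega
  refine ⟨u, ?_⟩
  rw [show 2 ^ (k - 1) * t - 2 ^ (k - 1) = 2 ^ (k-1) * (t - 1) by rw [Nat.mul_sub, Nat.mul_one],
    hu, show (2:Nat) ^ k = 2 ^ (k-1) * 2 by rw [← pow_succ]; congr 1; omega]
  ring

theorem pvEvenDvd (n k : Nat) (hk : 1 ≤ k) (hdvd : 2 ^ (k - 1) ∣ n) (hb : n.testBit (k - 1) = false) :
    2 ^ k ∣ n := by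
  obtain ⟨t, rfl⟩ := hdvd
  have hpow1 : 0 < (2:Nat) ^ (k - 1) := by positivity
  have hbit : (2 ^ (k - 1) * t).testBit (k - 1) = decide (t % 2 = 1) := by
    rw [Nat.testBit_eq_decide_div_mod_eq, Nat.mul_div_cancel_left _ hpow1]
  rw [hbit] at hb
  have ht : t % 2 = 0 := by simpa using hb
  obtain ⟨u, hu⟩ : 2 ∣ t := by omega
  refine ⟨u, ?_⟩
  rw [hu, show (2:Nat) ^ k = 2 ^ (k-1) * 2 by rw [← pow_succ]; congr 1; omega]
  ring

theorem pvLBitsNilOfSmall (n k : Nat) (hk : 1 ≤ k) (hlt : n < 2 ^ k) (hdvd : 2 ^ (k - 1) ∣ n) :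
    pvLBits n = [] := by
  obtain ⟨t, rfl⟩ := hdvd
  have hpow1 : 0 < (2:Nat) ^ (k - 1) := by positivity
  have h2k : (2:Nat) ^ k = 2 ^ (k - 1) * 2 := by rw [← pow_succ]; congr 1; omega
  have ht : t = 0 ∨ t = 1 := by
    by_contra h
    have h2 : 2 ≤ t := by omega
    have : 2 ^ (k - 1) * 2 ≤ 2 ^ (k - 1) * t := Nat.mul_le_mul_left _ h2
    omega
  rcases ht with rfl | rfl
  · simp [pvLBits]
  · rw [Nat.mul_one]
    have hlog : (2 ^ (k - 1)).log2 = k - 1 := Nat.log2_two_pow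
    rw [pvLBits, hlog, List.filter_eq_nil_iff]
    intro a ha
    rw [List.mem_range] at ha
    rw [Nat.testBit_two_pow]
    simp only [decide_eq_true_eq]
    omega

-- the while loop, entered at x = 2^k with the k-1 low bits of M already cleared,
-- appends the powers of two of M's set bits below its top bit
theorem pvALoopEq (k : Nat) (M : Int) (g : List Int) (hk : 1 ≤ k) (hM : 0 ≤ M)
    (hdvd : ((2 : Int) ^ (k - 1)) ∣ M) (hx : 2 ≤ ((2 : Int) ^ k)) :
    pvALoop g ((2 : Int) ^ k) M hx = g ++ ((pvLBits M.toNat).map (fun i => (2 : Int) ^ i)) := by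
  have hb1 : (1:Int) ≤ 2 ^ (k - 1) := one_le_pow₀ (by norm_num)
  obtain ⟨n, rfl⟩ : ∃ n : Nat, M = (n : Int) := ⟨M.toNat, by omega⟩
  have hdvdn : 2 ^ (k - 1) ∣ n := by
    have h : ((2 ^ (k - 1) : Nat) : Int) ∣ (n : Int) := by push_cast; exact hdvd
    exact_mod_cast h
  have h2k : ((2 : Int) ^ k) = ((2 ^ k : Nat) : Int) := by push_cast; ring
  rw [pvALoop]
  by_cases hle : ((2 : Int) ^ k) ≤ (n : Int)
  · have hlen : 2 ^ k ≤ n := by rw [h2k] at hle; exact_mod_cast hle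
    rw [dif_pos hle]
    have hrem : PySem.Int.mod (n : Int) ((2 : Int) ^ k) = ((n % 2 ^ k : Nat) : Int) := by
      rw [h2k]; exact PySem.Int.mod_natCast n (2 ^ k)
    simp only [hrem]
    rw [pvRemNat n k hk hdvdn]
    by_cases hbit : n.testBit (k - 1)
    · rw [if_pos hbit]
      rw [if_pos (by exact_mod_cast (by positivity : (0:Int) < ((2 ^ (k-1) : Nat) : Int)).ne')]
      have hx2 : ((2:Int) ^ k) * 2 = (2:Int) ^ (k + 1) := by rw [pow_succ]
      rw [show pvALoop (g ++ [((2 ^ (k-1) : Nat) : Int)]) ((2:Int)^k * 2) ((n : Int) - ((2 ^ (k - 1) : Nat) : Int)) (by omega)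
            = pvALoop (g ++ [((2 ^ (k-1) : Nat) : Int)]) ((2:Int)^(k+1)) (((n - 2 ^ (k - 1) : Nat) : Int)) (by rw [← hx2]; omega) by
          have hle2 : 2 ^ (k-1) ≤ n := le_trans (le_of_lt (Nat.pow_lt_pow_right (by norm_num) (by omega))) hlen
          congr 1
          omega]
      rw [pvALoopEq (k + 1) (((n - 2 ^ (k - 1) : Nat) : Int)) (g ++ [((2 ^ (k-1) : Nat) : Int)])
        (by omega) (by positivity)
        (by
          have hd := pvSubDvd n k hk hdvdn hbit
          have h2 : ((2 ^ k : Nat) : Int) ∣ ((n - 2 ^ (k - 1) : Nat) : Int) := Int.natCast_dvd_natCast.mpr hd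
          simpa [show (k + 1 - 1) = k by omega] using (by push_cast at h2 ⊢; exact h2 : ((2:Int) ^ k) ∣ _))
        (by
          have h3 : ((2:Int) ^ k) ≤ 2 ^ (k+1) := by
            have h4 : ((2:Int) ^ (k+1)) = 2 ^ k * 2 := by rw [pow_succ]
            omega
          omega)]
      simp only [Int.toNat_natCast]
      rw [pvLBitsCons n k hk hlen hdvdn hbit]
      simp only [List.map_cons, List.append_assoc, List.singleton_append]
      norm_cast
    · rw [if_neg hbit]
      rw [if_neg (by simp)]
      have hx2 : ((2:Int) ^ k) * 2 = (2:Int) ^ (k + 1) := by rw [pow_succ]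
      rw [show pvALoop g ((2:Int)^k * 2) (n : Int) (by omega)
            = pvALoop g ((2:Int)^(k+1)) (n : Int) (by rw [← hx2]; omega) by congr 1]
      rw [pvALoopEq (k + 1) (n : Int) g (by omega) (by positivity)
        (by
          have hd := pvEvenDvd n k hk hdvdn (by simpa using hbit)
          have h2 : ((2 ^ k : Nat) : Int) ∣ (n : Int) := Int.natCast_dvd_natCast.mpr hd
          simpa [show (k + 1 - 1) = k by omega] using (by push_cast at h2 ⊢; exact h2 : ((2:Int) ^ k) ∣ _))
        (by
          have h4 : ((2:Int) ^ (k+1)) = 2 ^ k * 2 := by rw [pow_succ]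
          omega)]
  · rw [dif_neg hle]
    have hlen : n < 2 ^ k := by
      rw [h2k] at hle; exact_mod_cast (by omega : (n : Int) < ((2 ^ k : Nat) : Int))
    rw [Int.toNat_natCast, pvLBitsNilOfSmall n k hk hlen hdvdn]
    simp
termination_by (M + 1 - (2 : Int) ^ k).toNat

theorem pvGoodArrayEq (N : Int) (h2 : (2:Int) ≤ 2) :
    pvALoop [] 2 N h2 = (pvLBits N.toNat).map (fun i => (2 : Int) ^ i) := by
  by_cases hN : 0 ≤ N
  · have h := pvALoopEq 1 N [] le_rfl hN (by simpa using (one_dvd N)) (by norm_num)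
    exact h.trans (List.nil_append _)
  · rw [pvALoop, dif_neg (by omega)]
    rw [show N.toNat = 0 by omega]
    simp [pvLBits]

theorem pvExpsEq (N : Int) : pvExps N = (pvLBits N.toNat).map (Nat.cast : Nat → Int) := by
  by_cases hN : 0 < N
  · obtain ⟨n, rfl⟩ : ∃ n : Nat, N = (n : Int) := ⟨N.toNat, by omega⟩
    have hn : n ≠ 0 := by omega
    have h1 : n < 2 ^ PySem.Int.bitLength (n : Int) := by
      have := PySem.Int.lt_two_pow_bitLength (n : Int); simpa using this
    have h2 : 2 ^ (PySem.Int.bitLength (n : Int) - 1) ≤ n := by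
      have := PySem.Int.two_pow_bitLength_le (n : Int) (by exact_mod_cast hn); simpa using this
    have hbl1 : 1 ≤ PySem.Int.bitLength (n : Int) := by
      by_contra h
      have h0 : PySem.Int.bitLength (n : Int) = 0 := by omega
      rw [h0] at h1; simp at h1; omega
    have hlog : n.log2 = PySem.Int.bitLength (n : Int) - 1 := by
      have ha : PySem.Int.bitLength (n : Int) - 1 ≤ n.log2 := (Nat.le_log2 hn).mpr h2
      have hb : n.log2 < PySem.Int.bitLength (n : Int) := (Nat.log2_lt hn).mpr h1
      omega
    have hcast : ((PySem.Int.bitLength (n : Int) : Int) - 1)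
        = ((PySem.Int.bitLength (n : Int) - 1 : Nat) : Int) := by omega
    rw [pvExps, if_pos hN, hcast, PySem.List.pyRange_zero_nat]
    rw [List.filter_map, pvLBits]
    simp only [Int.toNat_natCast]
    rw [show (fun (i : Int) => PySem.Int.band ((n:Int) >>> i.toNat) 1 != 0) ∘ (fun (k : Nat) => (k : Int))
        = fun (j : Nat) => (PySem.Int.band ((n:Int) >>> ((j:Int)).toNat) 1 != 0) from rfl]
    have hpred : (fun (j : Nat) => (PySem.Int.band ((n:Int) >>> ((j:Int)).toNat) 1 != 0)) = n.testBit := by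
      funext j
      rw [Int.toNat_natCast, ← Int.natCast_shiftRight,
        show (1 : Int) = ((1 : Nat) : Int) from rfl, PySem.Int.band_natCast,
        Nat.and_one_is_mod, Nat.shiftRight_eq_div_pow, Nat.testBit_eq_decide_div_mod_eq]
      have h01 : n / 2 ^ j % 2 = 0 ∨ n / 2 ^ j % 2 = 1 := by omega
      rcases h01 with h | h <;> simp [h]
    rw [hpred, hlog]
  · have hz : N.toNat = 0 := by omega
    rw [pvExps, if_neg hN, hz]
    simp [pvLBits]

-- reading the two derived arrays at the same (possibly negative, Python-wrapped) index
theorem pvGetRel (lbm : List Nat) (i : Int) (h1 : -(lbm.length : Int) ≤ i) (h2 : i < (lbm.length : Int)) :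
    PySem.List.pyGetD (lbm.map (fun b => (2 : Int) ^ b)) i 0
      = 2 ^ (PySem.List.pyGetD (lbm.map (Nat.cast : Nat → Int)) i (0 : Int)).toNat
    ∧ 0 ≤ PySem.List.pyGetD (lbm.map (Nat.cast : Nat → Int)) i (0 : Int) := by
  by_cases hi : 0 ≤ i
  · have hlt : i.toNat < lbm.length := by omega
    rw [show i = ((i.toNat : Nat) : Int) by omega]
    rw [PySem.List.pyGetD_natCast, PySem.List.pyGetD_natCast,
      List.getD_eq_getElem _ _ (by simpa using hlt), List.getD_eq_getElem _ _ (by simpa using hlt)]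
    exact ⟨by simp, by simp⟩
  · have hk0 : 0 < (-i).toNat := by omega
    have hkle : (-i).toNat ≤ lbm.length := by omega
    rw [show i = -(((-i).toNat : Nat) : Int) by omega]
    rw [PySem.List.pyGetD_neg_natCast _ _ _ hk0 (by simpa using hkle),
        PySem.List.pyGetD_neg_natCast _ _ _ hk0 (by simpa using hkle)]
    exact ⟨by simp, by simp⟩

-- A's inner modular-product loop, from any accumulator, over a nonempty index list
theorem pvFoldA (g : List Int) (m : Int) : ∀ (idxs : List Int) (a : Int), idxs ≠ [] →
    idxs.foldl (fun res i => ((PySem.List.pyGetD g i 0).fmod m * res).fmod m) a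
      = ((idxs.map (fun i => PySem.List.pyGetD g i 0)).prod * a).fmod m := by
  intro idxs
  induction idxs with
  | nil => intro a h; exact absurd rfl h
  | cons i is ih =>
    intro a _
    rcases is with _ | ⟨j, js⟩
    · simp [pvFmodMulLeft]
    · have hne : (j :: js) ≠ [] := by simp
      rw [List.foldl_cons, ih _ hne]
      set gi := PySem.List.pyGetD g i 0 with hgi
      set P := ((j :: js).map (fun i => PySem.List.pyGetD g i 0)).prod with hP
      calc (P * ((gi.fmod m * a).fmod m)).fmod m
          = (P * (gi.fmod m * a)).fmod m := pvFmodMulRight _ _ _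
        _ = ((gi.fmod m) * (P * a)).fmod m := by ring_nf
        _ = (gi * (P * a)).fmod m := pvFmodMulLeft _ _ _
        _ = (((i :: j :: js).map (fun i => PySem.List.pyGetD g i 0)).prod * a).fmod m := by
            rw [List.map_cons, List.prod_cons, ← hgi, ← hP]; ring_nf

-- the product of the read powers of two is two to the sum of the read exponents
theorem pvProdPow (lbm : List Nat) : ∀ (idxs : List Int),
    (∀ i ∈ idxs, -(lbm.length : Int) ≤ i ∧ i < (lbm.length : Int)) →
    (idxs.map (fun i => PySem.List.pyGetD (lbm.map (fun b => (2 : Int) ^ b)) i 0)).prod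
      = 2 ^ ((idxs.map (fun i => PySem.List.pyGetD (lbm.map (Nat.cast : Nat → Int)) i (0 : Int))).sum).toNat
    ∧ 0 ≤ (idxs.map (fun i => PySem.List.pyGetD (lbm.map (Nat.cast : Nat → Int)) i (0 : Int))).sum := by
  intro idxs
  induction idxs with
  | nil => intro _; simp
  | cons i is ih =>
    intro h
    obtain ⟨hi1, hi2⟩ := h i (by simp)
    obtain ⟨ihp, ihs⟩ := ih (fun j hj => h j (by simp [hj]))
    obtain ⟨hrel, hnn⟩ := pvGetRel lbm i hi1 hi2
    simp only [List.map_cons, List.prod_cons, List.sum_cons]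
    refine ⟨?_, by positivity⟩
    rw [ihp, hrel, ← pow_add]
    congr 1
    omega

-- one query: A's modular-product fold equals B's exponent-sum plus one modular power
theorem pvQueryEq (N : Int) (l r m : Int)
    (hq : r ≤ l - 1 ∨ (-(pvGoodLen N) ≤ l - 1 ∧ r ≤ pvGoodLen N)) :
    (PySem.List.pyRange (l - 1) r).foldl
      (fun result i => PySem.Int.mod (PySem.Int.mod (PySem.List.pyGetD ((pvLBits N.toNat).map (fun i => (2 : Int) ^ i)) i 0) m * result) m) 1
    = (if l - 1 ≥ r then 1
       else PySem.Int.powMod 2 ((PySem.List.pyRange (l - 1) r).foldl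
              (fun e i => e + PySem.List.pyGetD ((pvLBits N.toNat).map (Nat.cast : Nat → Int)) i 0) 0).toNat m) := by
  by_cases hc : l - 1 ≥ r
  · rw [if_pos hc, PySem.List.pyRange_one_eq_nil hc]
    rfl
  · rw [if_neg hc]
    set lbm := pvLBits N.toNat with hlbm
    have hmem : ∀ i ∈ PySem.List.pyRange (l - 1) r, -(lbm.length : Int) ≤ i ∧ i < (lbm.length : Int) := by
      intro i hi
      rw [PySem.List.mem_pyRange_one] at hi
      rcases hq with h | ⟨h1, h2⟩
      · omega
      · have hlen : pvGoodLen N = (lbm.length : Int) := rfl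
        rw [hlen] at h1 h2
        omega
    have hne : PySem.List.pyRange (l - 1) r ≠ [] := by
      rw [PySem.List.pyRange_one_cons (by omega)]
      simp
    simp only [PySem.Int.mod, PySem.Int.powMod]
    rw [pvFoldA (lbm.map (fun i => (2 : Int) ^ i)) m _ 1 hne]
    obtain ⟨hprod, hsum⟩ := pvProdPow lbm _ hmem
    rw [mul_one, hprod, PySem.List.foldl_add, zero_add]
-- ===== VERDICT (by name: the statement is the Claim_ definition above) =====
theorem countSubsequence_spec : Claim_equal_countSubsequence := by
  intro N queries _hdom hpre
  unfold Spec_countSubsequence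
  simp only [countSubsequence, countSubsequence_alt]
  rw [pvGoodArrayEq N (by norm_num), pvExpsEq N]
  rw [show (fun (results : List Int) (query : List Int) =>
        if PySem.List.pyGetD query 0 0 - 1 ≥ PySem.List.pyGetD query 1 0 then results ++ [1]
        else results ++ [PySem.Int.powMod 2 ((PySem.List.pyRange (PySem.List.pyGetD query 0 0 - 1) (PySem.List.pyGetD query 1 0)).foldl
            (fun e i => e + PySem.List.pyGetD ((pvLBits N.toNat).map (Nat.cast : Nat → Int)) i 0) 0).toNat (PySem.List.pyGetD query 2 0)])
      = (fun results query => results ++ [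
          if PySem.List.pyGetD query 0 0 - 1 ≥ PySem.List.pyGetD query 1 0 then 1
          else PySem.Int.powMod 2 ((PySem.List.pyRange (PySem.List.pyGetD query 0 0 - 1) (PySem.List.pyGetD query 1 0)).foldl
            (fun e i => e + PySem.List.pyGetD ((pvLBits N.toNat).map (Nat.cast : Nat → Int)) i 0) 0).toNat (PySem.List.pyGetD query 2 0)])
      by funext results query; split <;> rfl]
  rw [PySem.List.foldl_append_singleton_eq_map, PySem.List.foldl_append_singleton_eq_map]
  simp only [List.nil_append]
  apply List.map_congr_left
  intro q hq
  obtain ⟨h3, hcond⟩ := hpre q hq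
  exact pvQueryEq N (PySem.List.pyGetD q 0 0) (PySem.List.pyGetD q 1 0) (PySem.List.pyGetD q 2 0)
    (hcond.imp id (fun h => ⟨h.2.1, h.2.2⟩))
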